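-- pv_equiv track=rewrite | github.com/e-hokage777/competitive-programming | 0307-range-sum-query-mutable/0307-range-sum-query-mutable.py | prepare_bit
-- ===== SOURCE A (Python) =====
-- def prepare_bit(nums):
--     bit = [0] * (len(nums)+1)
--
--     for i in range(1, len(bit)):
--         index = i
--         diff = (index & -index)
--         start = index - diff + 1
--
--
--         bit[index] = sum(nums[start-1:index])
--
--     return bit
-- ===== SOURCE B (Python) =====
-- def prepare_bit(nums):
--     # One prefix-sum pass, then each BIT cell is a difference of two prefix
--     # sums: bit[i] covers nums[i & (i-1) : i], so bit[i] = pref[i] - pref[i & (i-1)].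
--     pref = [0]
--     s = 0
--     for v in nums:
--         s += v
--         pref.append(s)
--     bit = [0]
--     for i in range(1, len(nums) + 1):
--         bit.append(pref[i] - pref[i & (i - 1)])
--     return bit
-- ===== Notes on version B (the rewrite author's own statement) =====
-- stated objective: faster
-- what changed: Replaces per-index slice-and-sum (each bit[i] re-sums its whole range) by a single prefix-sum pass; each BIT cell becomes one subtraction pref[i] - pref[i & (i-1)].
import Mathlib
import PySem

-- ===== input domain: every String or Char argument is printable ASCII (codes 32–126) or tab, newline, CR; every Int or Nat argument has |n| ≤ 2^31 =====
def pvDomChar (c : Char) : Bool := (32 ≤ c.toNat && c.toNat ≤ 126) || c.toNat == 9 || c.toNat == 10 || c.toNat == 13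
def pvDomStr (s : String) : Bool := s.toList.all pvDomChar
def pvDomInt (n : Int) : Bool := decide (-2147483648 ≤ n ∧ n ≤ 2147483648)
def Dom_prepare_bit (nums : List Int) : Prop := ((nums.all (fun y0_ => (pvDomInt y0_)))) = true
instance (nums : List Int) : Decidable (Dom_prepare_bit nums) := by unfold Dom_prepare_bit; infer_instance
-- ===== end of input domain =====

-- B replaces A's per-index slice-and-sum by one prefix-sum pass plus a subtraction per cell (objective: faster).

-- ===== PORT A =====
-- literal port: bit = [0]*(len(nums)+1); for i in range(1, len(bit)): bit[index] = sum(nums[start-1:index])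
-- (the assigned index is always in [1, len(bit)-1], so List.set at index.toNat is exact)
def prepare_bit (nums : List Int) : List Int :=
  let bit : List Int := List.replicate (nums.length + 1) 0
  (PySem.List.pyRange 1 (bit.length : Int) 1).foldl
    (fun bit i =>
      let index := i
      let diff := PySem.Int.band index (-index)
      let start := index - diff + 1
      bit.set index.toNat (PySem.List.slice nums (some (start - 1)) (some index)).sum)
    bit

-- ===== PORT B =====
-- literal port of Source B: a prefix-sum pass, then bit.append(pref[i] - pref[i & (i-1)])
-- (pref[…] indices are always in range, so pyGetD with default 0 is exact)
def prepare_bit_alt (nums : List Int) : List Int :=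
  let pref := (nums.foldl (fun (p : List Int × Int) v => (p.1 ++ [p.2 + v], p.2 + v)) ([0], 0)).1
  (PySem.List.pyRange 1 ((nums.length : Int) + 1) 1).foldl
    (fun bit i =>
      bit ++ [PySem.List.pyGetD pref i 0 - PySem.List.pyGetD pref (PySem.Int.band i (i - 1)) 0])
    [0]

-- ===== PRECONDITION & SPEC =====
def Spec_prepare_bit (nums : List Int) (out : List Int) : Prop := out = prepare_bit_alt nums
instance (nums : List Int) (out : List Int) : Decidable (Spec_prepare_bit nums out) := by unfold Spec_prepare_bit; infer_instance

-- ===== CLAIM (what is proved, stated in full; the proofs are below) =====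
def Claim_equal_prepare_bit : Prop := ∀ (nums : List Int), Dom_prepare_bit nums → Spec_prepare_bit nums (prepare_bit nums)

-- ===== LEMMAS AND PROOFS =====

-- Python's  k & -k  for positive k, via PySem.Int.band:
theorem band_lowbit (m : Nat) :
    PySem.Int.band ((m + 1 : Nat) : Int) (-((m + 1 : Nat) : Int))
      = (((m + 1) - ((m + 1) &&& m) : Nat) : Int) := by
  unfold PySem.Int.band
  rw [if_pos (by positivity), if_neg (by push_cast; omega)]
  rw [show (((m + 1 : Nat) : Int)).toNat = m + 1 by omega,
    show (-(-((m + 1 : Nat) : Int)) - 1).toNat = m by omega]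

theorem pref_spec (nums : List Int) (acc : List Int) (s : Int) :
    (nums.foldl (fun (p : List Int × Int) v => (p.1 ++ [p.2 + v], p.2 + v)) (acc, s)).1
      = acc ++ (List.range nums.length).map (fun k => s + (nums.take (k + 1)).sum) := by
  induction nums generalizing acc s with
  | nil => simp
  | cons v t ih =>
      simp only [List.foldl_cons, ih, List.length_cons, List.range_succ_eq_map,
        List.map_cons, List.map_map, List.append_assoc, List.take_succ_cons]
      simp [Function.comp, add_assoc]

theorem pref_getD (nums : List Int) (c : Nat) (hc : c ≤ nums.length) :
    ((nums.foldl (fun (p : List Int × Int) v => (p.1 ++ [p.2 + v], p.2 + v)) (([0], 0) : List Int × Int)).1).getD c 0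
      = (nums.take c).sum := by
  rw [pref_spec]
  cases c with
  | zero => simp
  | succ k =>
      have hk : k < nums.length := by omega
      simp [hk]

theorem slice_sum (nums : List Int) (c i : Nat) (hci : c ≤ i) :
    (PySem.List.slice nums (some (c : Int)) (some (i : Int))).sum
      = (nums.take i).sum - (nums.take c).sum := by
  rw [PySem.List.slice_natCast]
  have : nums.take i = nums.take c ++ (nums.drop c).take (i - c) := by
    rw [← List.take_add]
    congr 1
    omega
  rw [this, List.sum_append]
  ring

-- A's loop, peeled from the right: after processing range(1, m+1) the list is
-- 0 :: (the m computed cells) ++ the untouched zero tail.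
theorem foldA (nums : List Int) (m : Nat) (hm : m ≤ nums.length) :
    (PySem.List.pyRange 1 ((m : Int) + 1) 1).foldl
        (fun bit i =>
          bit.set i.toNat
            (PySem.List.slice nums (some (i - PySem.Int.band i (-i) + 1 - 1)) (some i)).sum)
        (List.replicate (nums.length + 1) 0)
      = 0 :: ((PySem.List.pyRange 1 ((m : Int) + 1) 1).map
            (fun i => (PySem.List.slice nums (some (i - PySem.Int.band i (-i) + 1 - 1)) (some i)).sum)
          ++ List.replicate (nums.length - m) 0) := by
  induction m with
  | zero =>
      rw [PySem.List.pyRange_one_eq_nil (by norm_num)]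
      simp [List.replicate_succ]
  | succ m ih =>
      have h1 : ((m + 1 : Nat) : Int) + 1 = ((m : Int) + 1) + 1 := by push_cast; ring
      rw [h1, PySem.List.pyRange_one_succ_right (by omega), List.foldl_append,
        List.map_append, ih (by omega)]
      have hrep : List.replicate (nums.length - m) (0 : Int)
          = 0 :: List.replicate (nums.length - (m + 1)) 0 := by
        rw [show nums.length - m = (nums.length - (m + 1)) + 1 by omega, List.replicate_succ]
      simp only [List.foldl_cons, List.foldl_nil, hrep]
      rw [show (((m : Int) + 1).toNat) = m + 1 by omega]
      rw [show (0 : Int) :: (_ ++ (0 : Int) :: List.replicate (nums.length - (m + 1)) 0)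
            = ((0 : Int) :: _) ++ ((0 : Int) :: List.replicate (nums.length - (m + 1)) 0) from rfl]
      rw [List.set_append]
      simp

theorem prepare_bit_spec : Claim_equal_prepare_bit := by
  intro nums _
  unfold Spec_prepare_bit prepare_bit prepare_bit_alt
  simp only [List.length_replicate]
  rw [show ((nums.length + 1 : Nat) : Int) = (nums.length : Int) + 1 by push_cast; ring]
  rw [foldA nums nums.length le_rfl, PySem.List.foldl_append_singleton_eq_map]
  simp only [Nat.sub_self, List.replicate_zero, List.append_nil]
  rw [show ([(0 : Int)] : List Int) ++ _ = (0 : Int) :: _ from rfl]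
  congr 1
  apply List.map_congr_left
  intro i hi
  rw [PySem.List.mem_pyRange_one] at hi
  obtain ⟨h1, h2⟩ := hi
  obtain ⟨k, rfl⟩ : ∃ k : Nat, i = ((k + 1 : Nat) : Int) := ⟨(i - 1).toNat, by omega⟩
  have hk : k + 1 ≤ nums.length := by omega
  have hc : (k + 1) &&& k ≤ k + 1 := Nat.and_le_left
  rw [band_lowbit]
  rw [show ((k + 1 : Nat) : Int) - (((k + 1) - ((k + 1) &&& k) : Nat) : Int) + 1 - 1
        = (((k + 1) &&& k : Nat) : Int) by push_cast [hc]; omega]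
  rw [slice_sum nums ((k + 1) &&& k) (k + 1) hc]
  rw [show ((k + 1 : Nat) : Int) - 1 = ((k : Nat) : Int) by push_cast; ring]
  rw [PySem.Int.band_natCast]
  rw [PySem.List.pyGetD_natCast, PySem.List.pyGetD_natCast]
  rw [pref_getD nums (k + 1) hk, pref_getD nums ((k + 1) &&& k) (by omega)]
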